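-- pv_equiv track=rewrite | github.com/razabhadur/Cross-Chain-Security-Analyzer | cross_chain_security_analyzer.py | detect_replay_attacks
-- ===== SOURCE A (Python) =====
-- def detect_replay_attacks(eth_transactions, bsc_transactions, polygon_transactions):
--     eth_hashes = {tx['hash'] for tx in eth_transactions}
--     bsc_hashes = {tx['hash'] for tx in bsc_transactions}
--     polygon_hashes = {tx['hash'] for tx in polygon_transactions}
--
--     # Find matching transaction hashes across chains
--     replayed_on_bsc = eth_hashes.intersection(bsc_hashes)
--     replayed_on_polygon = eth_hashes.intersection(polygon_hashes)
--
--     return {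
--         "Ethereum-BSC Replay": replayed_on_bsc,
--         "Ethereum-Polygon Replay": replayed_on_polygon
--     }
-- ===== SOURCE B (Python) =====
-- def detect_replay_attacks(eth_transactions, bsc_transactions, polygon_transactions):
--     # Single inverted index: tx hash -> set of chain labels it appeared on.
--     seen = {}
--     for label, txs in (("eth", eth_transactions),
--                        ("bsc", bsc_transactions),
--                        ("polygon", polygon_transactions)):
--         for tx in txs:
--             seen.setdefault(tx['hash'], set()).add(label)
--     replayed_on_bsc = set()
--     replayed_on_polygon = set()
--     for h, chains in seen.items():
--         if "eth" in chains:
--             if "bsc" in chains: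
--                 replayed_on_bsc.add(h)
--             if "polygon" in chains:
--                 replayed_on_polygon.add(h)
--     return {
--         "Ethereum-BSC Replay": replayed_on_bsc,
--         "Ethereum-Polygon Replay": replayed_on_polygon
--     }
-- ===== Notes on version B (the rewrite author's own statement) =====
-- stated objective: alternative
-- what changed: Instead of building three per-chain hash sets and intersecting them, B builds one inverted index mapping each tx hash to the set of chain labels it appears on, then derives both replay sets in a single pass over that index.
import Mathlib
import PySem

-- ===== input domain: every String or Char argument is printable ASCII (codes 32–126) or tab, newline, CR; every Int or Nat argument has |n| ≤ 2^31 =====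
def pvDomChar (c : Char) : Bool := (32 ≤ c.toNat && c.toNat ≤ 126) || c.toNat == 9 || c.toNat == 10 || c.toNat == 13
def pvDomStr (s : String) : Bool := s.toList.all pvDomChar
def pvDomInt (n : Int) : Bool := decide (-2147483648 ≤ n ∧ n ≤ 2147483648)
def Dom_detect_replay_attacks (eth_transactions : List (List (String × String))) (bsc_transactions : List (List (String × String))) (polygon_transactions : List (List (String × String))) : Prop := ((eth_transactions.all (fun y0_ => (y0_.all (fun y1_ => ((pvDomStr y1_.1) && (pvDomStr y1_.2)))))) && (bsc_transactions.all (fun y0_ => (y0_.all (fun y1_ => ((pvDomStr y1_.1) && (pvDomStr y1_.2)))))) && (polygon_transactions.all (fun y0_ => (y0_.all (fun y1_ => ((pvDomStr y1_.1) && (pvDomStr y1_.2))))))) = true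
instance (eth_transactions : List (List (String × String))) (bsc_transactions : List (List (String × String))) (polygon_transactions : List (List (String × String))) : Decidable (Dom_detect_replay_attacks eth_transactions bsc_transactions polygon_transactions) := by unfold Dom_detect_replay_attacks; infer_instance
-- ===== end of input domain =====

-- B replaces A's three per-chain hash sets and two intersections by one inverted index
-- (hash -> set of chain labels) built in a single loop, read off in one pass (objective: alternative).

-- tx['hash'] on an association-list dict: first match; "" only outside Pre_ (where Python raises KeyError)
def pvTxHash (tx : List (String × String)) : String :=
  ((tx.find? (fun p => p.1 == "hash")).map (·.2)).getD ""

-- ===== PORT A =====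
def detect_replay_attacks (eth_transactions : List (List (String × String))) (bsc_transactions : List (List (String × String))) (polygon_transactions : List (List (String × String))) : List (String × List String) :=
  let eth_hashes : PySem.Set String := PySem.Set.ofList (eth_transactions.map pvTxHash)
  let bsc_hashes : PySem.Set String := PySem.Set.ofList (bsc_transactions.map pvTxHash)
  let polygon_hashes : PySem.Set String := PySem.Set.ofList (polygon_transactions.map pvTxHash)
  let replayed_on_bsc := PySem.Set.inter eth_hashes bsc_hashes
  let replayed_on_polygon := PySem.Set.inter eth_hashes polygon_hashes
  [("Ethereum-BSC Replay", replayed_on_bsc), ("Ethereum-Polygon Replay", replayed_on_polygon)]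

-- ===== PORT B =====
-- inner loop 'for tx in txs: seen.setdefault(tx["hash"], set()).add(label)'
def pvAddLabel (lab : String) (d : PySem.Dict String (PySem.Set String)) (txs : List (List (String × String))) : PySem.Dict String (PySem.Set String) :=
  txs.foldl (fun d tx => d.modify (pvTxHash tx) PySem.Set.empty (fun s => PySem.Set.add s lab)) d

def detect_replay_attacks_alt (eth_transactions : List (List (String × String))) (bsc_transactions : List (List (String × String))) (polygon_transactions : List (List (String × String))) : List (String × List String) :=
  let seen := pvAddLabel "polygon" (pvAddLabel "bsc" (pvAddLabel "eth" PySem.Dict.empty eth_transactions) bsc_transactions) polygon_transactions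
  let r := seen.items.foldl
    (fun (acc : PySem.Set String × PySem.Set String) (it : String × PySem.Set String) =>
      if it.2.contains "eth" then
        (if it.2.contains "bsc" then PySem.Set.add acc.1 it.1 else acc.1,
         if it.2.contains "polygon" then PySem.Set.add acc.2 it.1 else acc.2)
      else acc)
    (PySem.Set.empty, PySem.Set.empty)
  [("Ethereum-BSC Replay", r.1), ("Ethereum-Polygon Replay", r.2)]

-- ===== PRECONDITION & SPEC =====
-- Pre_ excludes exactly the inputs where some transaction dict has no "hash" key: there Python A (and B) raise KeyError.
def Pre_detect_replay_attacks (eth_transactions : List (List (String × String))) (bsc_transactions : List (List (String × String))) (polygon_transactions : List (List (String × String))) : Prop :=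
  ((eth_transactions.all (fun tx => tx.any (fun p => p.1 == "hash"))) &&
   (bsc_transactions.all (fun tx => tx.any (fun p => p.1 == "hash"))) &&
   (polygon_transactions.all (fun tx => tx.any (fun p => p.1 == "hash")))) = true
instance (eth_transactions : List (List (String × String))) (bsc_transactions : List (List (String × String))) (polygon_transactions : List (List (String × String))) : Decidable (Pre_detect_replay_attacks eth_transactions bsc_transactions polygon_transactions) := by unfold Pre_detect_replay_attacks; infer_instance

def pvWitness_detect_replay_attacks : (List (List (String × String))) × (List (List (String × String))) × (List (List (String × String))) :=
  ([[("hash", "a")], [("hash", "b")]], [[("hash", "a")]], [[("hash", "c")]])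

def Spec_detect_replay_attacks (eth_transactions : List (List (String × String))) (bsc_transactions : List (List (String × String))) (polygon_transactions : List (List (String × String))) (out : List (String × List String)) : Prop := out = detect_replay_attacks_alt eth_transactions bsc_transactions polygon_transactions
instance (eth_transactions : List (List (String × String))) (bsc_transactions : List (List (String × String))) (polygon_transactions : List (List (String × String))) (out : List (String × List String)) : Decidable (Spec_detect_replay_attacks eth_transactions bsc_transactions polygon_transactions out) := by unfold Spec_detect_replay_attacks; infer_instance

-- ===== CLAIM (what is proved, stated in full; the proofs are below) =====
def Claim_equal_detect_replay_attacks : Prop := ∀ (eth_transactions : List (List (String × String))) (bsc_transactions : List (List (String × String))) (polygon_transactions : List (List (String × String))), Dom_detect_replay_attacks eth_transactions bsc_transactions polygon_transactions → Pre_detect_replay_attacks eth_transactions bsc_transactions polygon_transactions → Spec_detect_replay_attacks eth_transactions bsc_transactions polygon_transactions (detect_replay_attacks eth_transactions bsc_transactions polygon_transactions)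

-- ===== LEMMAS AND PROOFS =====

-- value of the index after one labelling pass
theorem pv_getD_addLabel (lab : String) (txs : List (List (String × String)))
    (d : PySem.Dict String (PySem.Set String)) (x : String) :
    (pvAddLabel lab d txs).getD x PySem.Set.empty =
      if x ∈ txs.map pvTxHash then PySem.Set.add (d.getD x PySem.Set.empty) lab
      else d.getD x PySem.Set.empty := by
  induction txs generalizing d with
  | nil => simp [pvAddLabel]
  | cons tx txs ih =>
      simp only [pvAddLabel, List.foldl_cons, List.map_cons, List.mem_cons]
      rw [show (List.foldl (fun d tx => PySem.Dict.modify d (pvTxHash tx) PySem.Set.empty (fun s => PySem.Set.add s lab)) (PySem.Dict.modify d (pvTxHash tx) PySem.Set.empty (fun s => PySem.Set.add s lab)) txs) = pvAddLabel lab (PySem.Dict.modify d (pvTxHash tx) PySem.Set.empty (fun s => PySem.Set.add s lab)) txs from rfl]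
      rw [ih]
      rw [PySem.Dict.getD_modify]
      by_cases hx : x = pvTxHash tx <;> by_cases hm : x ∈ txs.map pvTxHash <;>
        simp [hx, hm]

-- keys of the index after one labelling pass
theorem pv_keys_addLabel (lab : String) (txs : List (List (String × String)))
    (d : PySem.Dict String (PySem.Set String)) :
    (pvAddLabel lab d txs).keys = PySem.Set.update d.keys (txs.map pvTxHash) := by
  simpa [pvAddLabel] using
    PySem.Dict.keys_foldl_modify_key (l := txs) (key := pvTxHash)
      (d0 := PySem.Set.empty) (f := fun _ _ => (fun s => PySem.Set.add s lab)) (d := d)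

theorem pv_nodup_keys_addLabel (lab : String) (txs : List (List (String × String)))
    (d : PySem.Dict String (PySem.Set String)) (h : d.keys.Nodup) :
    (pvAddLabel lab d txs).keys.Nodup := by
  simpa [pvAddLabel] using
    PySem.Dict.nodup_keys_foldl_modify_key (l := txs) (key := pvTxHash)
      (d0 := PySem.Set.empty) (f := fun _ _ => (fun s => PySem.Set.add s lab)) (d := d) h

-- folding the pair-building loop over fresh keys appends the filtered keys
theorem pv_fold_items (g : String → PySem.Set String) (K : List String) (s t : PySem.Set String)
    (hK : K.Nodup) (hs : ∀ k ∈ K, k ∉ s) (ht : ∀ k ∈ K, k ∉ t) :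
    (K.map (fun k => (k, g k))).foldl
      (fun (acc : PySem.Set String × PySem.Set String) (it : String × PySem.Set String) =>
        if "eth" ∈ it.2 then
          (if "bsc" ∈ it.2 then PySem.Set.add acc.1 it.1 else acc.1,
           if "polygon" ∈ it.2 then PySem.Set.add acc.2 it.1 else acc.2)
        else acc) (s, t) =
      (s ++ K.filter (fun k => decide ("eth" ∈ g k) && decide ("bsc" ∈ g k)),
       t ++ K.filter (fun k => decide ("eth" ∈ g k) && decide ("polygon" ∈ g k))) := by
  induction K generalizing s t with
  | nil => simp
  | cons k K ih =>
      have hks : k ∉ s := hs k (by simp)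
      have hkt : k ∉ t := ht k (by simp)
      have hadds : PySem.Set.add s k = s ++ [k] := PySem.Set.add_of_not_mem hks
      have haddt : PySem.Set.add t k = t ++ [k] := PySem.Set.add_of_not_mem hkt
      have hK' : K.Nodup := hK.of_cons
      have hkK : k ∉ K := by simpa using (List.nodup_cons.mp hK).1
      have hs0 : ∀ k' ∈ K, k' ∉ s := fun k' hk' => hs k' (by simp [hk'])
      have ht0 : ∀ k' ∈ K, k' ∉ t := fun k' hk' => ht k' (by simp [hk'])
      have hs1 : ∀ k' ∈ K, k' ∉ s ++ [k] := by
        intro k' hk'; simp only [List.mem_append, List.mem_singleton]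
        rintro (h' | rfl); exact hs0 k' hk' h'; exact hkK hk'
      have ht1 : ∀ k' ∈ K, k' ∉ t ++ [k] := by
        intro k' hk'; simp only [List.mem_append, List.mem_singleton]
        rintro (h' | rfl); exact ht0 k' hk' h'; exact hkK hk'
      by_cases he : "eth" ∈ g k
      · by_cases hb : "bsc" ∈ g k
        · by_cases hp : "polygon" ∈ g k
          · simp [he, hb, hp, hadds, haddt, ih (s ++ [k]) (t ++ [k]) hK' hs1 ht1]
          · simp [he, hb, hp, hadds, ih (s ++ [k]) t hK' hs1 ht0]
        · by_cases hp : "polygon" ∈ g k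
          · simp [he, hb, hp, haddt, ih s (t ++ [k]) hK' hs0 ht1]
          · simp [he, hb, hp, ih s t hK' hs0 ht0]
      · simp [he, ih s t hK' hs0 ht0]

-- filtering Set.update by a predicate that only holds inside s drops the appended part
theorem pv_filter_update (s : PySem.Set String) (l : List String) (p : String → Bool)
    (h : ∀ x ∈ l, p x = true → x ∈ s) :
    (PySem.Set.update s l).filter p = s.filter p := by
  induction l generalizing s with
  | nil => rfl
  | cons x l ih =>
      simp only [PySem.Set.update, List.foldl_cons]
      by_cases hx : x ∈ s
      · rw [PySem.Set.add_of_mem hx]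
        exact ih s (fun y hy => h y (by simp [hy]))
      · rw [PySem.Set.add_of_not_mem hx]
        rw [show List.foldl PySem.Set.add (s ++ [x]) l = PySem.Set.update (s ++ [x]) l from rfl]
        rw [ih (s ++ [x]) (by intro y hy hpy; rcases h y (by simp [hy]) hpy with h' ; simp [h'])]
        have hpx : p x = false := by
          by_contra hc
          exact hx (h x (by simp) (by simpa using hc))
        simp [List.filter_append, hpx]
  
-- ===== VERDICT (by name: the statement is the Claim_ definition above) =====
theorem pv_seen_getD (e b p : List (List (String × String))) (x : String) :
    (pvAddLabel "polygon" (pvAddLabel "bsc" (pvAddLabel "eth" PySem.Dict.empty e) b) p).getD x PySem.Set.empty =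
      (let s1 := if x ∈ e.map pvTxHash then PySem.Set.add PySem.Set.empty "eth" else PySem.Set.empty
       let s2 := if x ∈ b.map pvTxHash then PySem.Set.add s1 "bsc" else s1
       if x ∈ p.map pvTxHash then PySem.Set.add s2 "polygon" else s2) := by
  rw [pv_getD_addLabel, pv_getD_addLabel, pv_getD_addLabel]
  simp only [PySem.Dict.getD_empty]

theorem pv_seen_eth (e b p : List (List (String × String))) (x : String) :
    ("eth" ∈ (pvAddLabel "polygon" (pvAddLabel "bsc" (pvAddLabel "eth" PySem.Dict.empty e) b) p).getD x PySem.Set.empty) ↔ x ∈ e.map pvTxHash := by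
  rw [pv_seen_getD]
  split_ifs <;> simp_all [PySem.Set.empty]

theorem pv_seen_bsc (e b p : List (List (String × String))) (x : String) :
    ("bsc" ∈ (pvAddLabel "polygon" (pvAddLabel "bsc" (pvAddLabel "eth" PySem.Dict.empty e) b) p).getD x PySem.Set.empty) ↔ x ∈ b.map pvTxHash := by
  rw [pv_seen_getD]
  split_ifs <;> simp_all [PySem.Set.empty]

theorem pv_seen_poly (e b p : List (List (String × String))) (x : String) :
    ("polygon" ∈ (pvAddLabel "polygon" (pvAddLabel "bsc" (pvAddLabel "eth" PySem.Dict.empty e) b) p).getD x PySem.Set.empty) ↔ x ∈ p.map pvTxHash := by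
  rw [pv_seen_getD]
  split_ifs <;> simp_all [PySem.Set.empty]

theorem detect_replay_attacks_spec : Claim_equal_detect_replay_attacks := by
  intro e b p _dom _pre
  unfold Spec_detect_replay_attacks
  set seen := pvAddLabel "polygon" (pvAddLabel "bsc" (pvAddLabel "eth" PySem.Dict.empty e) b) p with hseen
  have hnodup : seen.keys.Nodup := by
    rw [hseen]
    exact pv_nodup_keys_addLabel _ _ _ (pv_nodup_keys_addLabel _ _ _
      (pv_nodup_keys_addLabel _ _ _ (by simp [PySem.Dict.keys_empty])))
  have hkeys : seen.keys =
      PySem.Set.update (PySem.Set.ofList (e.map pvTxHash)) (b.map pvTxHash ++ p.map pvTxHash) := by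
    rw [hseen, pv_keys_addLabel, pv_keys_addLabel, pv_keys_addLabel]
    simp [PySem.Set.update, List.foldl_append, PySem.Dict.keys_empty, PySem.Set.ofList, PySem.Set.empty]
  have hitems : seen.items = seen.keys.map (fun k => (k, seen.getD k PySem.Set.empty)) :=
    PySem.Dict.items_eq_map_keys seen hnodup _
  have hr := pv_fold_items (fun k => seen.getD k PySem.Set.empty) seen.keys
      PySem.Set.empty PySem.Set.empty hnodup
      (by intro k _; simp [PySem.Set.empty]) (by intro k _; simp [PySem.Set.empty])
  rw [← hitems] at hr
  have hstep : (fun (acc : PySem.Set String × PySem.Set String) (it : String × PySem.Set String) =>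
        if it.2.contains "eth" then
          (if it.2.contains "bsc" then PySem.Set.add acc.1 it.1 else acc.1,
           if it.2.contains "polygon" then PySem.Set.add acc.2 it.1 else acc.2)
        else acc)
      = (fun (acc : PySem.Set String × PySem.Set String) (it : String × PySem.Set String) =>
        if "eth" ∈ it.2 then
          (if "bsc" ∈ it.2 then PySem.Set.add acc.1 it.1 else acc.1,
           if "polygon" ∈ it.2 then PySem.Set.add acc.2 it.1 else acc.2)
        else acc) := by
    funext acc it
    by_cases h1 : "eth" ∈ it.2 <;> by_cases h2 : "bsc" ∈ it.2 <;> by_cases h3 : "polygon" ∈ it.2 <;>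
      simp [h1, h2, h3]
  have hfb : seen.keys.filter (fun k => decide ("eth" ∈ seen.getD k PySem.Set.empty) &&
        decide ("bsc" ∈ seen.getD k PySem.Set.empty))
      = PySem.Set.inter (PySem.Set.ofList (e.map pvTxHash)) (PySem.Set.ofList (b.map pvTxHash)) := by
    rw [hkeys]
    rw [pv_filter_update _ _ _ (by
      intro x _ hpx
      simp only [hseen, pv_seen_eth, pv_seen_bsc, Bool.and_eq_true, decide_eq_true_eq] at hpx
      simp [PySem.Set.mem_ofList, hpx.1])]
    simp only [PySem.Set.inter]
    apply List.filter_congr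
    intro x hx
    have hxE : x ∈ e.map pvTxHash := (PySem.Set.mem_ofList _ _).mp hx
    rw [Bool.eq_iff_iff]
    simp only [Bool.and_eq_true, decide_eq_true_eq, hseen, pv_seen_eth, pv_seen_bsc,
      PySem.Set.contains_iff, PySem.Set.mem_ofList]
    tauto
  have hfp : seen.keys.filter (fun k => decide ("eth" ∈ seen.getD k PySem.Set.empty) &&
        decide ("polygon" ∈ seen.getD k PySem.Set.empty))
      = PySem.Set.inter (PySem.Set.ofList (e.map pvTxHash)) (PySem.Set.ofList (p.map pvTxHash)) := by
    rw [hkeys]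
    rw [pv_filter_update _ _ _ (by
      intro x _ hpx
      simp only [hseen, pv_seen_eth, pv_seen_poly, Bool.and_eq_true, decide_eq_true_eq] at hpx
      simp [PySem.Set.mem_ofList, hpx.1])]
    simp only [PySem.Set.inter]
    apply List.filter_congr
    intro x hx
    have hxE : x ∈ e.map pvTxHash := (PySem.Set.mem_ofList _ _).mp hx
    rw [Bool.eq_iff_iff]
    simp only [Bool.and_eq_true, decide_eq_true_eq, hseen, pv_seen_eth, pv_seen_poly,
      PySem.Set.contains_iff, PySem.Set.mem_ofList]
    tauto
  show detect_replay_attacks e b p = detect_replay_attacks_alt e b p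
  simp only [detect_replay_attacks, detect_replay_attacks_alt]
  rw [← hseen, hstep, hr]
  simp only [List.cons.injEq, Prod.mk.injEq, and_true, true_and]
  constructor
  · rw [hfb]; simp [PySem.Set.empty]
  · rw [hfp]; simp [PySem.Set.empty]
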